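-- pv_equiv track=rewrite | github.com/brisutom/AoC2019 | 22/part1.py | deal_inc
-- ===== SOURCE A (Python) =====
-- def deal_inc(deck, n):
--     new_deck = len(deck)*[-1]
--     pos = 0
--     while deck:
--         card = deck.pop(0)
--         new_deck[pos] = card
--         pos = (pos + n) % len(new_deck)
--     return new_deck
-- ===== SOURCE B (Python) =====
-- def deal_inc(deck, n):
--     L = len(deck)
--     new_deck = [-1] * L
--     for i, card in enumerate(deck):
--         new_deck[(i * n) % L] = card
--     return new_deck
-- ===== Notes on version B (the rewrite author's own statement) =====
-- stated objective: faster
-- what changed: Replaces the pop(0)-driven while loop (quadratic list shifting) and the running pos accumulator with a single enumerate pass writing each card directly to (i*n) % len.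
import Mathlib
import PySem

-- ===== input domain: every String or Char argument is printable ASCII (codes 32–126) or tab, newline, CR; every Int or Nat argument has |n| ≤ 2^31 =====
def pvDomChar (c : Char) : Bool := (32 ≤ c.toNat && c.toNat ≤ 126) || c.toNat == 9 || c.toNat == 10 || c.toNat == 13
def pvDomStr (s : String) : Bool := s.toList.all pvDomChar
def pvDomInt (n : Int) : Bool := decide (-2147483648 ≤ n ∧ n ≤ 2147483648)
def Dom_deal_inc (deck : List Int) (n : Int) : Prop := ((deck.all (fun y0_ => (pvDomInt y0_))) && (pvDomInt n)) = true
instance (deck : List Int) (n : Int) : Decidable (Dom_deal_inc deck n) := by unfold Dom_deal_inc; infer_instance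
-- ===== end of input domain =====

-- B writes each card in one enumerate pass at (i*n) % len instead of popping from the front with a running
-- position (asymptotically faster in a timing run). A empties its deck argument in place; B does not
-- mutate it — the equivalence proved here is about the return value only.

-- ===== PORT A =====
-- the while loop: pop(0), write at pos, advance pos modulo len(new_deck)
def dealIncLoopA (rem : List Int) (nd : List Int) (pos : Int) (n : Int) : List Int :=
  match rem with
  | [] => nd
  | card :: rest =>
      let nd' := PySem.List.pySetD nd pos card
      dealIncLoopA rest nd' (PySem.Int.mod (pos + n) (nd'.length : Int)) n

def deal_inc (deck : List Int) (n : Int) : List Int :=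
  dealIncLoopA deck (List.replicate deck.length (-1)) 0 n

-- ===== PORT B =====
def deal_inc_alt (deck : List Int) (n : Int) : List Int :=
  let L : Int := (deck.length : Int)
  (PySem.List.enumerate deck).foldl
    (fun nd p => PySem.List.pySetD nd (PySem.Int.mod (p.1 * n) L) p.2)
    (List.replicate deck.length (-1))

-- ===== PRECONDITION & SPEC =====
def Spec_deal_inc (deck : List Int) (n : Int) (out : List Int) : Prop := out = deal_inc_alt deck n
instance (deck : List Int) (n : Int) (out : List Int) : Decidable (Spec_deal_inc deck n out) := by unfold Spec_deal_inc; infer_instance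

-- ===== CLAIM (what is proved, stated in full; the proofs are below) =====
def Claim_equal_deal_inc : Prop := ∀ (deck : List Int) (n : Int), Dom_deal_inc deck n → Spec_deal_inc deck n (deal_inc deck n)

-- ===== LEMMAS AND PROOFS =====

-- A's running position after k steps is (k*n) % L; with that invariant the loop is B's fold.
lemma dealIncLoopA_eq_foldl (n : Int) (L : Nat) (hL : 0 < L) :
    ∀ (rem nd : List Int) (k : Int), nd.length = L →
      dealIncLoopA rem nd (PySem.Int.mod (k * n) (L : Int)) n =
      (PySem.List.enumerate rem k).foldl
        (fun nd p => PySem.List.pySetD nd (PySem.Int.mod (p.1 * n) (L : Int)) p.2) nd := by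
  intro rem
  induction rem with
  | nil => intro nd k _; simp [dealIncLoopA, PySem.List.enumerate_nil]
  | cons card rest ih =>
      intro nd k hnd
      have hLpos : (0 : Int) < (L : Int) := by exact_mod_cast hL
      have hlen : (PySem.List.pySetD nd (PySem.Int.mod (k * n) (L : Int)) card).length = L := by
        rw [PySem.List.length_pySetD, hnd]
      have hmod : PySem.Int.mod (PySem.Int.mod (k * n) (L : Int) + n) (L : Int)
          = PySem.Int.mod ((k + 1) * n) (L : Int) := by
        rw [PySem.Int.mod_eq_emod_of_pos hLpos, PySem.Int.mod_eq_emod_of_pos hLpos,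
            PySem.Int.mod_eq_emod_of_pos hLpos, Int.emod_add_emod]
        ring_nf
      simp only [dealIncLoopA, PySem.List.enumerate_cons, List.foldl_cons, hlen, hmod]
      exact ih _ (k + 1) hlen

theorem deal_inc_eq_alt (deck : List Int) (n : Int) : deal_inc deck n = deal_inc_alt deck n := by
  cases deck with
  | nil => rfl
  | cons x xs =>
      simp only [deal_inc, deal_inc_alt]
      have hL : 0 < (x :: xs).length := by simp
      have h0 : (0 : Int) = PySem.Int.mod (0 * n) ((x :: xs).length : Int) := by
        have hLpos : (0 : Int) < ((x :: xs).length : Int) := by exact_mod_cast hL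
        rw [zero_mul, PySem.Int.mod_eq_emod_of_pos hLpos, Int.zero_emod]
      conv_lhs => rw [h0]
      exact dealIncLoopA_eq_foldl n (x :: xs).length hL (x :: xs)
        (List.replicate (x :: xs).length (-1)) 0 (by simp)

-- ===== VERDICT (by name: the statement is the Claim_ definition above) =====
theorem deal_inc_spec : Claim_equal_deal_inc := by
  intro deck n _
  exact deal_inc_eq_alt deck n
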